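-- pv_equiv track=rewrite | github.com/anshukrra07/plagiarism-detector | api/main.py | _edit_distance_pct
-- ===== SOURCE A (Python) =====
-- def _edit_distance_pct(a: str, b: str) -> int:
--     """
--     Word-level edit distance as % of longer sentence.
--     0% = identical, 100% = completely different.
--     """
--     wa = a.lower().split()
--     wb = b.lower().split()
--     if not wa or not wb:
--         return 100
--     # Simple LCS-based word diff
--     m, n = len(wa), len(wb)
--     dp = [[0]*(n+1) for _ in range(m+1)]
--     for i in range(1, m+1):
--         for j in range(1, n+1):
--             dp[i][j] = dp[i-1][j-1]+1 if wa[i-1]==wb[j-1] else max(dp[i-1][j], dp[i][j-1])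
--     common = dp[m][n]
--     changed = max(m, n) - common
--     return round(changed / max(m, n) * 100)
-- ===== SOURCE B (Python) =====
-- def _edit_distance_pct(a: str, b: str) -> int:
--     """
--     Word-level edit distance as % of longer sentence.
--     0% = identical, 100% = completely different.
--     """
--     wa = a.lower().split()
--     wb = b.lower().split()
--     if not wa or not wb:
--         return 100
--     m, n = len(wa), len(wb)
--     # Top-down memoized recursion on the LCS structure instead of a bottom-up table.
--     memo = {}
--     def lcs(i, j):
--         if i == 0 or j == 0:
--             return 0
--         if (i, j) in memo:
--             return memo[(i, j)]
--         if wa[i - 1] == wb[j - 1]: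
--             v = lcs(i - 1, j - 1) + 1
--         else:
--             v = max(lcs(i - 1, j), lcs(i, j - 1))
--         memo[(i, j)] = v
--         return v
--     common = lcs(m, n)
--     changed = max(m, n) - common
--     return round(changed / max(m, n) * 100)
-- ===== Notes on version B (the rewrite author's own statement) =====
-- stated objective: alternative
-- what changed: The bottom-up nested-loop DP table is replaced by a top-down recursive helper lcs(i,j) on the LCS recurrence, memoized in a dict, so only the subproblems actually reached are computed and no (m+1)x(n+1) table exists.
import Mathlib
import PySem

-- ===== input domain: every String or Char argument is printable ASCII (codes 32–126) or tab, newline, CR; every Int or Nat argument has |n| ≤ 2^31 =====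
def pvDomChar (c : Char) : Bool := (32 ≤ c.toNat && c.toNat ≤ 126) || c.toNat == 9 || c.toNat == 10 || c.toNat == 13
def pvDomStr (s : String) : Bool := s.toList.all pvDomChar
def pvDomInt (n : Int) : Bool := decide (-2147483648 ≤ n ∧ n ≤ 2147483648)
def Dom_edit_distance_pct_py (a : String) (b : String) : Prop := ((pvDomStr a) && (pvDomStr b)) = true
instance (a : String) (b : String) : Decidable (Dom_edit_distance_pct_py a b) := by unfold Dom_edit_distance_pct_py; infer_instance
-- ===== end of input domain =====

-- B replaces A's bottom-up nested-loop (m+1)×(n+1) DP table by a top-down recursive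
-- LCS helper memoized in a dict (alternative decomposition, same asymptotic cost).
-- The identical preamble (lower/split/empty-guard) and the identical final line
-- round(changed / max(m,n) * 100) are shared; pyRound100 models that float expression exactly
-- (IEEE-754 binary64 division, multiplication by 100, and round-half-to-even).

-- ===== PORT A =====
-- round-half-to-even of the exact rational p/q (q > 0)
def rheN (p q : Nat) : Nat :=
  let d := p / q
  let r := p % q
  if 2 * r < q then d else if q < 2 * r then d + 1 else if d % 2 = 0 then d else d + 1

-- exact model of Python's  round(c / mx * 100)  for ints 0 ≤ c ≤ mx, 1 ≤ mx (IEEE-754 binary64):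
-- c/mx rounded to 53 significant bits, times 100 rounded to 53 bits, then round-half-even to int.
def pyRound100 (c mx : Int) : Int :=
  let c := c.toNat
  let mx := mx.toNat
  if c = 0 then 0 else
  let t := (2 ^ 52 * mx + c - 1) / c                      -- ceil(2^52*mx/c)
  let e := if t ≤ 1 then 0 else Nat.log2 (t - 1) + 1      -- minimal e with 2^e ≥ t
  let nn := rheN (c * 2 ^ e) mx                           -- 53-bit significand of c/mx
  let p := nn * 100
  let s := (if p = 0 then 0 else Nat.log2 p + 1) - 53     -- excess bits of p
  let m2 := rheN p (2 ^ s)                                -- 53-bit significand of that * 100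
  ((rheN (m2 * 2 ^ s) (2 ^ e) : Nat) : Int)               -- round half-even to int

-- body of A's inner loop: dp[i][j] = dp[i-1][j-1]+1 if wa[i-1]==wb[j-1] else max(dp[i-1][j], dp[i][j-1])
def innerA (wa wb : List String) (i : Int) (dp : List (List Int)) (j : Int) : List (List Int) :=
  let v : Int :=
    if PySem.List.pyGetD wa (i - 1) "" = PySem.List.pyGetD wb (j - 1) "" then
      PySem.List.pyGetD (PySem.List.pyGetD dp (i - 1) []) (j - 1) 0 + 1
    else
      max (PySem.List.pyGetD (PySem.List.pyGetD dp (i - 1) []) j 0)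
          (PySem.List.pyGetD (PySem.List.pyGetD dp i []) (j - 1) 0)
  dp.modify i.toNat (fun row => row.set j.toNat v)

-- body of A's outer loop: for j in range(1, n+1)
def outerA (wa wb : List String) (dp : List (List Int)) (i : Int) : List (List Int) :=
  (PySem.List.pyRange 1 ((wb.length : Int) + 1) 1).foldl (innerA wa wb i) dp

def edit_distance_pct_py (a : String) (b : String) : Int :=
  let wa := PySem.Str.split₀ (PySem.Str.lower a)
  let wb := PySem.Str.split₀ (PySem.Str.lower b)
  if wa = [] ∨ wb = [] then 100 else
  let m : Int := wa.length
  let n : Int := wb.length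
  let dp : List (List Int) :=
    (PySem.List.pyRange 0 (m + 1) 1).map (fun _ => PySem.List.pyRepeat [(0 : Int)] (n + 1))
  let dp := (PySem.List.pyRange 1 (m + 1) 1).foldl (outerA wa wb) dp
  let common := PySem.List.pyGetD (PySem.List.pyGetD dp m []) n 0
  let changed := max m n - common
  pyRound100 changed (max m n)

-- ===== PORT B =====
-- top-down memoized lcs(i, j) of Source B: returns the value together with the updated memo dict
def lcsB (wa wb : List String) (i j : Nat) (memo : PySem.Dict (Nat × Nat) Int) :
    Int × PySem.Dict (Nat × Nat) Int :=
  if _h : i = 0 ∨ j = 0 then (0, memo)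
  else
    match memo.get? (i, j) with
    | some v => (v, memo)
    | none =>
      if PySem.List.pyGetD wa ((i : Int) - 1) "" = PySem.List.pyGetD wb ((j : Int) - 1) "" then
        let r := lcsB wa wb (i - 1) (j - 1) memo
        let v := r.1 + 1
        (v, r.2.insert (i, j) v)
      else
        let r1 := lcsB wa wb (i - 1) j memo
        let r2 := lcsB wa wb i (j - 1) r1.2
        let v := max r1.1 r2.1
        (v, r2.2.insert (i, j) v)
termination_by i + j
decreasing_by all_goals omega

def edit_distance_pct_py_alt (a : String) (b : String) : Int :=
  let wa := PySem.Str.split₀ (PySem.Str.lower a)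
  let wb := PySem.Str.split₀ (PySem.Str.lower b)
  if wa = [] ∨ wb = [] then 100 else
  let m : Int := wa.length
  let n : Int := wb.length
  let common := (lcsB wa wb wa.length wb.length PySem.Dict.empty).1
  let changed := max m n - common
  pyRound100 changed (max m n)

-- ===== PRECONDITION & SPEC =====
def Spec_edit_distance_pct_py (a : String) (b : String) (out : Int) : Prop := out = edit_distance_pct_py_alt a b
instance (a : String) (b : String) (out : Int) : Decidable (Spec_edit_distance_pct_py a b out) := by unfold Spec_edit_distance_pct_py; infer_instance

-- ===== CLAIM (what is proved, stated in full; the proofs are below) =====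
def Claim_equal_edit_distance_pct_py : Prop := ∀ (a : String) (b : String), Dom_edit_distance_pct_py a b → Spec_edit_distance_pct_py a b (edit_distance_pct_py a b)

-- ===== LEMMAS AND PROOFS =====

-- the LCS-of-prefixes function both programs compute: Lf wa wb i j = LCS(wa[:i], wb[:j])
def Lf (wa wb : List String) : Nat → Nat → Int
  | 0, _ => 0
  | _ + 1, 0 => 0
  | i + 1, j + 1 =>
    if wa.getD i "" = wb.getD j "" then Lf wa wb i j + 1
    else max (Lf wa wb i (j + 1)) (Lf wa wb (i + 1) j)
termination_by i j => i + j

theorem Lf_zero_left (wa wb : List String) (j : Nat) : Lf wa wb 0 j = 0 := by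
  cases j <;> simp [Lf]

theorem Lf_zero_right (wa wb : List String) (i : Nat) : Lf wa wb i 0 = 0 := by
  cases i <;> simp [Lf]

-- generic reads/writes on lists of the shape (List.range N).map f
theorem mapRange_set {α : Type} (N k : Nat) (f : Nat → α) (v : α) (_hk : k < N) :
    ((List.range N).map f).set k v = (List.range N).map (fun i => if i = k then v else f i) := by
  apply List.ext_getElem
  · simp
  · intro i hi hi2
    simp only [List.getElem_set, List.getElem_map, List.getElem_range]
    by_cases h : k = i <;> simp [h]
    omega

theorem mapRange_modify {α : Type} (N k : Nat) (f : Nat → α) (g : α → α) (_hk : k < N) :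
    ((List.range N).map f).modify k g = (List.range N).map (fun i => if i = k then g (f k) else f i) := by
  apply List.ext_getElem
  · simp
  · intro i hi hi2
    simp only [List.getElem_modify, List.getElem_map, List.getElem_range]
    by_cases h : k = i <;> simp [h]
    omega

theorem pyGetD_mapRange {α : Type} (f : Nat → α) (N k : Nat) (d : α) (hk : k < N) :
    PySem.List.pyGetD ((List.range N).map f) (k : Int) d = f k := by
  rw [PySem.List.pyGetD_natCast]
  exact PySem.List.getD_map_range f N k d hk

-- ========== B side: the memo dict only ever holds correct Lf values ==========
def GoodMemo (wa wb : List String) (memo : PySem.Dict (Nat × Nat) Int) : Prop :=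
  ∀ (i j : Nat) (v : Int), memo.get? (i, j) = some v → v = Lf wa wb i j

theorem lcsB_correct (wa wb : List String) :
    ∀ (N i j : Nat) (memo : PySem.Dict (Nat × Nat) Int), i + j ≤ N → GoodMemo wa wb memo →
      (lcsB wa wb i j memo).1 = Lf wa wb i j ∧ GoodMemo wa wb (lcsB wa wb i j memo).2 := by
  intro N
  induction N with
  | zero =>
    intro i j memo hN hG
    have hi : i = 0 := by omega
    subst hi
    rw [lcsB]
    simp [Lf_zero_left, hG]
  | succ N ih =>
    intro i j memo hN hG
    by_cases h0 : i = 0 ∨ j = 0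
    · rw [lcsB]
      rcases h0 with h | h <;> subst h <;>
        simp [Lf_zero_left, Lf_zero_right, hG]
    · obtain ⟨i0, rfl⟩ : ∃ i0, i = i0 + 1 := ⟨i - 1, by omega⟩
      obtain ⟨j0, rfl⟩ : ∃ j0, j = j0 + 1 := ⟨j - 1, by omega⟩
      rw [lcsB]
      simp only [dif_neg h0]
      cases hmv : memo.get? (i0 + 1, j0 + 1) with
      | some v =>
        exact ⟨hG _ _ _ hmv, hG⟩
      | none =>
        have hca : ((i0 + 1 : Nat) : Int) - 1 = ((i0 : Nat) : Int) := by push_cast; ring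
        have hcb : ((j0 + 1 : Nat) : Int) - 1 = ((j0 : Nat) : Int) := by push_cast; ring
        simp only [hca, hcb, PySem.List.pyGetD_natCast, Nat.add_sub_cancel]
        rw [Lf]
        by_cases hw : wa.getD i0 "" = wb.getD j0 ""
        · simp only [if_pos hw]
          have hr := ih i0 j0 memo (by omega) hG
          refine ⟨by rw [hr.1], ?_⟩
          intro i' j' v' hv'
          rw [PySem.Dict.get?_insert] at hv'
          by_cases he : (i', j') = ((i0 + 1 : Nat), (j0 + 1 : Nat))
          · rw [if_pos he] at hv'
            obtain ⟨h1, h2⟩ := Prod.mk.injEq .. ▸ he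
            cases hv'
            rw [h1, h2, Lf, if_pos hw, hr.1]
          · rw [if_neg he] at hv'
            exact hr.2 _ _ _ hv'
        · simp only [if_neg hw]
          have hr1 := ih i0 (j0 + 1) memo (by omega) hG
          have hr2 := ih (i0 + 1) j0 _ (by omega) hr1.2
          refine ⟨by rw [hr1.1, hr2.1], ?_⟩
          intro i' j' v' hv'
          rw [PySem.Dict.get?_insert] at hv'
          by_cases he : (i', j') = ((i0 + 1 : Nat), (j0 + 1 : Nat))
          · rw [if_pos he] at hv'
            obtain ⟨h1, h2⟩ := Prod.mk.injEq .. ▸ he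
            cases hv'
            rw [h1, h2, Lf, if_neg hw, hr1.1, hr2.1]
          · rw [if_neg he] at hv'
            exact hr2.2 _ _ _ hv'

theorem commonB (wa wb : List String) :
    (lcsB wa wb wa.length wb.length PySem.Dict.empty).1 = Lf wa wb wa.length wb.length := by
  have hG : GoodMemo wa wb PySem.Dict.empty := by
    intro i j v hv
    simp [PySem.Dict.get?_empty] at hv
  exact (lcsB_correct wa wb (wa.length + wb.length) wa.length wb.length PySem.Dict.empty le_rfl hG).1

-- ========== A side ==========
def cellA (wa wb : List String) (i jc i' j : Nat) : Int :=
  if i' < i ∨ (i' = i ∧ j ≤ jc) then Lf wa wb i' j else 0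

def tbl (wa wb : List String) (i jc : Nat) : List (List Int) :=
  (List.range (wa.length + 1)).map (fun i' =>
    (List.range (wb.length + 1)).map (fun j => cellA wa wb i jc i' j))

theorem tbl_read (wa wb : List String) (i jc i' j : Nat)
    (hi' : i' < wa.length + 1) (hj : j < wb.length + 1) :
    PySem.List.pyGetD (PySem.List.pyGetD (tbl wa wb i jc) (i' : Int) []) (j : Int) 0 =
      cellA wa wb i jc i' j := by
  unfold tbl
  rw [pyGetD_mapRange _ _ _ _ hi', pyGetD_mapRange _ _ _ _ hj]

theorem tbl_row_shift (wa wb : List String) (i : Nat) :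
    tbl wa wb i wb.length = tbl wa wb (i + 1) 0 := by
  unfold tbl cellA
  apply List.map_congr_left
  intro i' hi'
  apply List.map_congr_left
  intro j hj
  simp only [List.mem_range] at hi' hj
  by_cases h1 : i' < i
  · have h2 : i' < i + 1 := by omega
    simp [h1, h2]
  · by_cases h2 : i' = i
    · subst h2
      have h3 : i' < i' + 1 := by omega
      have h4 : j ≤ wb.length := by omega
      simp [h3, h4]
    · by_cases h3 : i' = i + 1
      · subst h3
        have h4 : ¬ (i + 1 < i) := by omega
        have h5 : ¬ (i + 1 < i + 1) := by omega
        have h6 : ¬ (i + 1 = i) := by omega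
        by_cases h7 : j = 0
        · simp [h4, h7, Lf_zero_right]
        · have : ¬ (j ≤ 0) := by omega
          simp [h4, this]
      · have h4 : ¬ (i' < i + 1) := by omega
        simp [h1, h2, h3, h4]

theorem innerA_step (wa wb : List String) (i0 jc : Nat) (hi : i0 + 1 ≤ wa.length)
    (hjc : jc < wb.length) :
    innerA wa wb ((i0 : Int) + 1) (tbl wa wb (i0 + 1) jc) ((jc : Int) + 1) =
      tbl wa wb (i0 + 1) (jc + 1) := by
  unfold innerA
  have hc0 : ((i0 : Int) + 1) - 1 = ((i0 : Nat) : Int) := by ring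
  have hcj : ((jc : Int) + 1) - 1 = ((jc : Nat) : Int) := by ring
  have hci : ((i0 : Int) + 1) = ((i0 + 1 : Nat) : Int) := by push_cast; ring
  have hcj2 : ((jc : Int) + 1) = ((jc + 1 : Nat) : Int) := by push_cast; ring
  have hi0 : i0 < wa.length + 1 := by omega
  have hi1 : i0 + 1 < wa.length + 1 := by omega
  have hj0 : jc < wb.length + 1 := by omega
  have hj1 : jc + 1 < wb.length + 1 := by omega
  have hc0' : (((i0 + 1 : Nat) : Int)) - 1 = ((i0 : Nat) : Int) := by push_cast; ring
  have hcj' : (((jc + 1 : Nat) : Int)) - 1 = ((jc : Nat) : Int) := by push_cast; ring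
  simp only [hci, hcj2]
  simp only [hc0', hcj']
  simp only [PySem.List.pyGetD_natCast wa, PySem.List.pyGetD_natCast wb,
    tbl_read wa wb _ _ _ _ hi0 hj0, tbl_read wa wb _ _ _ _ hi0 hj1,
    tbl_read wa wb _ _ _ _ hi1 hj0]
  have ht1 : (((i0 + 1 : Nat) : Int)).toNat = i0 + 1 := by omega
  rw [ht1]
  conv_lhs => rw [tbl]
  rw [mapRange_modify _ _ _ _ hi1]
  have hcell1 : cellA wa wb (i0 + 1) jc i0 jc = Lf wa wb i0 jc := by
    unfold cellA; simp
  have hcell2 : cellA wa wb (i0 + 1) jc i0 (jc + 1) = Lf wa wb i0 (jc + 1) := by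
    unfold cellA; simp
  have hcell3 : cellA wa wb (i0 + 1) jc (i0 + 1) jc = Lf wa wb (i0 + 1) jc := by
    unfold cellA; simp
  rw [hcell1, hcell2, hcell3]
  have ht2 : (((jc + 1 : Nat) : Int)).toNat = jc + 1 := by omega
  rw [ht2, mapRange_set _ _ _ _ hj1]
  unfold tbl
  apply List.map_congr_left
  intro i' hi'
  simp only [List.mem_range] at hi'
  by_cases h : i' = i0 + 1
  · subst h
    simp only [reduceIte]
    apply List.map_congr_left
    intro j hj
    simp only [List.mem_range] at hj
    by_cases hjeq : j = jc + 1
    · subst hjeq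
      unfold cellA
      rw [Lf]
      simp
    · simp only [if_neg hjeq]
      unfold cellA
      by_cases hc : i0 + 1 < i0 + 1 ∨ (i0 + 1 = i0 + 1 ∧ j ≤ jc)
      · have hc' : (i0 + 1 < i0 + 1 ∨ (i0 + 1 = i0 + 1 ∧ j ≤ jc + 1)) := by omega
        rw [if_pos hc, if_pos hc']
      · have hc' : ¬ (i0 + 1 < i0 + 1 ∨ (i0 + 1 = i0 + 1 ∧ j ≤ jc + 1)) := by omega
        rw [if_neg hc, if_neg hc']
  · simp only [if_neg h]
    apply List.map_congr_left
    intro j hj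
    unfold cellA
    by_cases hc : i' < i0 + 1 ∨ (i' = i0 + 1 ∧ j ≤ jc)
    · have hc' : (i' < i0 + 1 ∨ (i' = i0 + 1 ∧ j ≤ jc + 1)) := by
        rcases hc with h1 | h2
        · exact Or.inl h1
        · exact absurd h2.1 h
      rw [if_pos hc, if_pos hc']
    · have hc' : ¬ (i' < i0 + 1 ∨ (i' = i0 + 1 ∧ j ≤ jc + 1)) := by
        intro hcc
        rcases hcc with h1 | h2
        · exact hc (Or.inl h1)
        · exact absurd h2.1 h
      rw [if_neg hc, if_neg hc']

theorem innerA_fold (wa wb : List String) (i0 : Nat) (hi : i0 + 1 ≤ wa.length) :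
    ∀ (d jc : Nat), jc + d = wb.length →
    (PySem.List.pyRange ((jc : Int) + 1) ((wb.length : Int) + 1) 1).foldl
        (innerA wa wb ((i0 : Int) + 1)) (tbl wa wb (i0 + 1) jc) =
      tbl wa wb (i0 + 1) wb.length := by
  intro d
  induction d with
  | zero =>
    intro jc h
    have hjc : jc = wb.length := by omega
    subst hjc
    rw [PySem.List.pyRange_one_eq_nil (by omega)]
    simp
  | succ d ih =>
    intro jc h
    have hjc : jc < wb.length := by omega
    rw [PySem.List.pyRange_one_cons (by omega)]
    simp only [List.foldl_cons]
    rw [innerA_step wa wb i0 jc hi hjc]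
    have hc : ((jc : Int) + 1) + 1 = ((jc + 1 : Nat) : Int) + 1 := by push_cast; ring
    rw [hc]
    exact ih (jc + 1) (by omega)

theorem outerA_fold (wa wb : List String) :
    ∀ (d i0 : Nat), i0 + d = wa.length →
    (PySem.List.pyRange ((i0 : Int) + 1) ((wa.length : Int) + 1) 1).foldl
        (outerA wa wb) (tbl wa wb i0 wb.length) =
      tbl wa wb wa.length wb.length := by
  intro d
  induction d with
  | zero =>
    intro i0 h
    have hi0 : i0 = wa.length := by omega
    subst hi0
    rw [PySem.List.pyRange_one_eq_nil (by omega)]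
    simp
  | succ d ih =>
    intro i0 h
    have hi0 : i0 < wa.length := by omega
    rw [PySem.List.pyRange_one_cons (by omega)]
    simp only [List.foldl_cons]
    have hstep : outerA wa wb (tbl wa wb i0 wb.length) ((i0 : Int) + 1) =
        tbl wa wb (i0 + 1) wb.length := by
      unfold outerA
      rw [tbl_row_shift wa wb i0]
      have := innerA_fold wa wb i0 (by omega) wb.length 0 (by omega)
      simpa using this
    rw [hstep]
    have hc : ((i0 : Int) + 1) + 1 = ((i0 + 1 : Nat) : Int) + 1 := by push_cast; ring
    rw [hc]
    exact ih (i0 + 1) (by omega)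

theorem initA (wa wb : List String) :
    (PySem.List.pyRange 0 ((wa.length : Int) + 1) 1).map
        (fun _ => PySem.List.pyRepeat [(0 : Int)] ((wb.length : Int) + 1)) =
      tbl wa wb 0 wb.length := by
  rw [PySem.List.pyRepeat_singleton]
  have ht : (((wb.length : Int)) + 1).toNat = wb.length + 1 := by omega
  rw [ht]
  apply List.ext_getElem
  · simp [tbl, PySem.List.length_pyRange_one]
  · intro i hi hi2
    simp only [List.getElem_map]
    unfold tbl
    simp only [List.getElem_map, List.getElem_range]
    apply List.ext_getElem
    · simp
    · intro j hj hj2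
      simp only [List.getElem_replicate, List.getElem_map, List.getElem_range]
      unfold cellA
      by_cases h : i = 0
      · simp [h, Lf_zero_left]
      · have hc : ¬ (i < 0 ∨ (i = 0 ∧ j ≤ wb.length)) := by omega
        rw [if_neg hc]

theorem commonA (wa wb : List String) :
    PySem.List.pyGetD
        (PySem.List.pyGetD
          ((PySem.List.pyRange 1 ((wa.length : Int) + 1) 1).foldl (outerA wa wb)
            ((PySem.List.pyRange 0 ((wa.length : Int) + 1) 1).map
              (fun _ => PySem.List.pyRepeat [(0 : Int)] ((wb.length : Int) + 1))))
          (wa.length : Int) [])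
        (wb.length : Int) 0 =
      Lf wa wb wa.length wb.length := by
  rw [initA wa wb]
  have := outerA_fold wa wb wa.length 0 (by omega)
  simp only [Nat.cast_zero, zero_add] at this
  rw [this]
  rw [tbl_read wa wb _ _ _ _ (by omega) (by omega)]
  unfold cellA
  simp

-- ===== VERDICT (by name: the statement is the Claim_ definition above) =====
theorem edit_distance_pct_py_spec : Claim_equal_edit_distance_pct_py := by
  unfold Claim_equal_edit_distance_pct_py
  intro a b _
  unfold Spec_edit_distance_pct_py edit_distance_pct_py edit_distance_pct_py_alt
  by_cases h : PySem.Str.split₀ (PySem.Str.lower a) = [] ∨ PySem.Str.split₀ (PySem.Str.lower b) = []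
  · simp only [if_pos h]
  · simp only [if_neg h]
    rw [commonA, commonB]
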